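-- pv_equiv track=rewrite | github.com/Bycclin/abcd_engine | searchers.py | get_t_key
-- ===== SOURCE A (Python) =====
-- def get_t_key(board, t_table):
--     if len(t_table) == 0:
--         return 1000000000000000
--     # copy just the keys
--     keys = [_ for _ in t_table]
--     keys.sort()
--     for k, p in t_table.items():
--         if p[0] == board:
--             return k
--     return keys[0] - 1
-- ===== SOURCE B (Python) =====
-- def get_t_key(board, t_table):
--     # single fused pass: return the first matching key immediately,
--     # otherwise maintain the running minimum key and return min_key - 1
--     items = iter(t_table.items())
--     first = next(items, None)
--     if first is None:
--         return 1000000000000000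
--     k, p = first
--     if p[0] == board:
--         return k
--     min_key = k
--     for k, p in items:
--         if p[0] == board:
--             return k
--         if k < min_key:
--             min_key = k
--     return min_key - 1
-- ===== Notes on version B (the rewrite author's own statement) =====
-- stated objective: simpler
-- what changed: Replaces A's copy-all-keys-then-sort pass plus a separate search loop by one fused loop over the items that returns the first matching key immediately and otherwise keeps a running minimum key, returning min_key - 1 at the end; the sorted keys list disappears.
import Mathlib
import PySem

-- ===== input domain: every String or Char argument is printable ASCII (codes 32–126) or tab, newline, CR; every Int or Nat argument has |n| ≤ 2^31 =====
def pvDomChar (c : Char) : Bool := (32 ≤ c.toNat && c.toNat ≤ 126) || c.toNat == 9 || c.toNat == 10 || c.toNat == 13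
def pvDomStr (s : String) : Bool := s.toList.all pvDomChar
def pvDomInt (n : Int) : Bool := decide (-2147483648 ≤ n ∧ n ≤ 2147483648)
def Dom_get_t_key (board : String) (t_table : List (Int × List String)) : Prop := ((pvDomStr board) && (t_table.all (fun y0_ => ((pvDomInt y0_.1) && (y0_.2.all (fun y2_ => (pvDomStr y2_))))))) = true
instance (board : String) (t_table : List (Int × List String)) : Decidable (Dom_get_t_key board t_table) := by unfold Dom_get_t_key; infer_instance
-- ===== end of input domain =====

-- B fuses A's copy-keys+sort pass and separate search loop into one loop keeping a running minimum key (same values, no sort).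


-- ===== PORT A =====
-- the `for k, p in t_table.items(): if p[0] == board: return k` loop;
-- `p[0] == board` is ported as `p.head? = some board`, exact whenever p ≠ [];
-- Pre_ guarantees any empty p lies after a match, so the loop never inspects one on admitted inputs
def pvAScan (board : String) : List (Int × List String) → Option Int
  | [] => none
  | (k, p) :: rest => if p.head? = some board then some k else pvAScan board rest

def get_t_key (board : String) (t_table : List (Int × List String)) : Int :=
  if t_table.length = 0 then 1000000000000000
  else
    -- keys = [_ for _ in t_table]; keys.sort()
    let keys := PySem.List.sorted (t_table.map Prod.fst) (fun x => x) false
    match pvAScan board t_table with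
    | some k => k
    | none => keys.headI - 1  -- keys[0]: exact, keys is nonempty here

-- ===== PORT B =====
-- the fused loop after the first item: min_key accumulator
def pvBLoop (board : String) (minKey : Int) : List (Int × List String) → Int
  | [] => minKey - 1
  | (k, p) :: rest =>
      if p.head? = some board then k
      else pvBLoop board (if k < minKey then k else minKey) rest

def get_t_key_alt (board : String) (t_table : List (Int × List String)) : Int :=
  match t_table with
  | [] => 1000000000000000
  | (k, p) :: rest => if p.head? = some board then k else pvBLoop board k rest

-- ===== PRECONDITION & SPEC =====
-- Pre_ excludes exactly the inputs where Python A (and B) raises IndexError: an item with an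
-- empty position list reached before the first item whose first position equals board.
def Pre_get_t_key (board : String) (t_table : List (Int × List String)) : Prop :=
  ∀ i < t_table.length, (t_table.getD i (0, [])).2 = [] →
    ∃ j < i, ((t_table.getD j (0, [])).2).head? = some board
instance (board : String) (t_table : List (Int × List String)) : Decidable (Pre_get_t_key board t_table) := by unfold Pre_get_t_key; infer_instance

def pvWitness_get_t_key : String × (List (Int × List String)) := ("b", [(3, ["a"]), (1, ["b"])])

def Spec_get_t_key (board : String) (t_table : List (Int × List String)) (out : Int) : Prop := out = get_t_key_alt board t_table
instance (board : String) (t_table : List (Int × List String)) (out : Int) : Decidable (Spec_get_t_key board t_table out) := by unfold Spec_get_t_key; infer_instance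

-- ===== CLAIM (what is proved, stated in full; the proofs are below) =====
def Claim_equal_get_t_key : Prop := ∀ (board : String) (t_table : List (Int × List String)), Dom_get_t_key board t_table → Pre_get_t_key board t_table → Spec_get_t_key board t_table (get_t_key board t_table)

-- ===== LEMMAS AND PROOFS =====

-- when the scan finds a match, B's fused loop returns the same key, whatever its accumulator
theorem pvBLoop_of_match (board : String) (l : List (Int × List String)) (k : Int)
    (h : pvAScan board l = some k) : ∀ mn, pvBLoop board mn l = k := by
  induction l with
  | nil => simp [pvAScan] at h
  | cons hd tl ih =>
      obtain ⟨kh, ph⟩ := hd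
      intro mn
      by_cases hm : ph.head? = some board
      · simp [pvAScan, hm] at h; simp [pvBLoop, hm, h]
      · simp [pvAScan, hm] at h; simp [pvBLoop, hm, ih h]

-- when no item matches, B's fused loop computes the minimum of accumulator and keys, minus 1
theorem pvBLoop_of_no_match (board : String) (l : List (Int × List String))
    (h : pvAScan board l = none) :
    ∀ mn, pvBLoop board mn l = (l.map Prod.fst).foldl min mn - 1 := by
  induction l with
  | nil => intro mn; simp [pvBLoop]
  | cons hd tl ih =>
      obtain ⟨kh, ph⟩ := hd
      intro mn
      by_cases hm : ph.head? = some board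
      · simp [pvAScan, hm] at h
      · simp [pvAScan, hm] at h
        simp [pvBLoop, hm, ih h]
        congr 1
        rcases lt_or_ge kh mn with hlt | hge
        · simp [if_pos hlt, min_eq_right (le_of_lt hlt)]
        · simp [if_neg (not_lt.mpr hge), min_eq_left hge]

theorem foldl_min_mem (ks : List Int) : ∀ k0, ks.foldl min k0 ∈ k0 :: ks := by
  induction ks with
  | nil => intro k0; simp
  | cons h t ih =>
      intro k0
      simp only [List.foldl_cons]
      rcases List.mem_cons.mp (ih (min k0 h)) with hmem | hmem
      · rw [hmem]
        rcases le_total k0 h with hle | hle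
        · rw [min_eq_left hle]; simp
        · rw [min_eq_right hle]; simp
      · simp [hmem]

theorem foldl_min_le (ks : List Int) : ∀ k0, ∀ y ∈ k0 :: ks, ks.foldl min k0 ≤ y := by
  induction ks with
  | nil => intro k0 y hy; simp at hy; simp [hy]
  | cons h t ih =>
      intro k0 y hy
      simp only [List.foldl_cons]
      have hacc : ∀ z ∈ min k0 h :: t, t.foldl min (min k0 h) ≤ z := ih (min k0 h)
      simp only [List.mem_cons] at hy
      rcases hy with rfl | rfl | hy
      · exact le_trans (hacc (min y h) (by simp)) (min_le_left _ _)
      · exact le_trans (hacc (min k0 y) (by simp)) (min_le_right _ _)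
      · exact hacc y (by simp [hy])

-- head of the sorted key list is the running minimum of the keys
theorem sorted_headI_eq_foldl_min (k0 : Int) (ks : List Int) :
    (PySem.List.sorted (k0 :: ks) (fun x => x) false).headI = ks.foldl min k0 := by
  obtain ⟨m, t, hs⟩ : ∃ m t, PySem.List.sorted (k0 :: ks) (fun x => x) false = m :: t := by
    cases hcase : PySem.List.sorted (k0 :: ks) (fun x => x) false with
    | nil => exact absurd ((PySem.List.sorted_eq_nil_iff (k0 :: ks) (fun x => x) false).mp hcase) (by simp)
    | cons m t => exact ⟨m, t, rfl⟩
  rw [hs]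
  have hmem : m ∈ k0 :: ks := by
    have := PySem.List.mem_sorted (k0 :: ks) (fun x => x) false m
    rw [hs] at this
    exact this.mp (by simp)
  have hle : ∀ y ∈ k0 :: ks, m ≤ y := PySem.List.key_head_sorted_le (k0 :: ks) (fun x => x) hs
  exact le_antisymm (hle _ (foldl_min_mem ks k0)) (foldl_min_le ks k0 m hmem)

-- ===== VERDICT (by name: the statement is the Claim_ definition above) =====
theorem get_t_key_spec : Claim_equal_get_t_key := by
  intro board t_table _ _
  show get_t_key board t_table = get_t_key_alt board t_table
  cases t_table with
  | nil => rfl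
  | cons hd rest =>
      obtain ⟨k0, p0⟩ := hd
      by_cases hm : p0.head? = some board
      · simp [get_t_key, get_t_key_alt, hm, pvAScan]
      · cases hscan : pvAScan board rest with
        | some k =>
            simp [get_t_key, get_t_key_alt, hm, pvAScan, hscan,
                  pvBLoop_of_match board rest k hscan]
        | none =>
            simp [get_t_key, get_t_key_alt, hm, pvAScan, hscan,
                  pvBLoop_of_no_match board rest hscan,
                  sorted_headI_eq_foldl_min]
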